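/- GENERATED by tools/from_farm_form.py from prooffarm-gif/accepted/GifFreeExtensions.1/Proof.lean (a worked proof of the farm's unit `GifFreeExtensions.1`,
   accepted by the verdict) — do not edit. -/
import Gif.Spec.Units.GifFreeExtensions_1
import Gif.Spec.AllSegs

/-!
  `GifFreeExtensions.1` (0x107da0 … 0x107dc3, 0x107e27 … ret; 19 instructions; gifalloc.c:268-276, 282): the prologue of
  `GifFreeExtensions` and the checked load of `*blocks`.

      entry ── 4 pushes, sub rsp, 8 ── r12 = &count, rbp = &blocks ── check ── rbx = *blocks ── test rbx, rbx
                 ├─ (NULL: the empty list, `ex = none`)  ── 0x107e27: add rsp, 8, 4 pops, ret          `Returned`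
                 └─ (the list `ex = some x`: `x.arr`, the base of a live object, is not NULL) ── 0x107dd9   `Head … 0`

  The only check (0x107db3) is justified by "the pointer cell lies inside the live holder `(ob, on)`" (`ExtCells.holder`, `.bpIn`).
  Everything written is 48 bytes of stack below the entry's stack pointer: one gap window (`fe1_stack_gap`).
-/

set_option maxRecDepth 4000
set_option maxHeartbeats 4000000

namespace Gif.Spec.GifFreeExtensions_1
open X86 X86.User Asan ProgX.Base ProgX.Base.Spec Gif.Spec

/-- The 48 bytes of stack the segment writes (four pushes, the reserved slot, the check's return address) are a window that
meets no object of the heap and lies in the stack below the entry's stack pointer `sp`: the footprint clause of the contract's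
post, and `GifFreeExtensions.GapWin` of the loop head. -/
theorem fe1_stack_gap {H : Heap} {mem : Mem} (hok : HeapOK H mem) (hbase : H.base = 0x800000) (sp : Nat)
    (hroom : 0x700000 + 80 ≤ sp) (htop : sp + 8 ≤ 0x800000) :
    Gap0 H ⟨sp - 48, sp⟩ ∧
      (0x800000 ≤ (⟨sp - 48, sp⟩ : Span).lo ∨ (0x700000 ≤ (⟨sp - 48, sp⟩ : Span).lo ∧ (⟨sp - 48, sp⟩ : Span).hi ≤ sp)) := by
  refine ⟨?_, Or.inr ⟨?_, ?_⟩⟩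
  · intro o ho
    have hor := (hok.obj_range ho).1
    rw [hbase] at hor
    left
    simp only
    omega
  · simp only
    omega
  · exact Nat.le_refl _

/-- **The empty list** (`ex = none`: the pointer cell holds NULL): 0x107da0 … the checked load … 0x107e27 … `ret`. The heap is
`H.releaseAll [] = H`, the two cells hold `(0, 0)` as before, only stack was written. -/
theorem fe1_empty (Lay : Layout) (hLay : Lay.hi = 0x1000000) (μ : Microarch) (hμ : UserX.MicroOK μ) (u₀ : State)
    (hcode : HasCodeNat Lay u₀ Gif.L.GifFreeExtensions.entry Gif.Code.code_GifFreeExtensions.nat Gif.L.GifFreeExtensions.size)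
    (h_load8 : Asan.SmallCheck Lay μ ProgX.Base.WayInv (ProgX.Base.CodeOK u₀) [.rax, .rcx, .rdx] 8
      ProgX.Base.L.__asan_load8_noabort.entry)
    (H : Heap) (rest : List Obj) (frames : List (Nat × FrameLayout)) (ob on : Nat) (e : State) (ret : Word)
    (he : AtEntry (conv u₀) Gif.L.GifFreeExtensions.entry (GifFreeExtensions.spec H rest frames none ob on).frame ret e)
    (hpre : (GifFreeExtensions.spec H rest frames none ob on).pre e) :
    ReachVia Lay μ WayInv e (fun w =>
      (∃ x, GifFreeExtensions.Head H rest frames none ob on x 0 u₀ e ret w) ∨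
      Returned (conv u₀) (GifFreeExtensions.spec H rest frames none ob on) e ret w) := by
  -- THE PRELUDE: the entry's facts, the precondition, where the holder of the two cells is (inside [800040H, C00000H))
  v_entry he
  obtain ⟨hp, hcells⟩ := hpre
  have hbase := hp.base
  have hlimit := hp.limit
  have hlive : H.Live ob on := hcells.holder
  obtain ⟨cap, hcap⟩ := hcells.holder
  have hr1 := (hp.inv.heap.obj_range hcap).1
  have hi3 := (hp.inv.heap.obj_inside hcap).2.2.1
  rw [hbase] at hr1
  simp only at hr1 hi3
  have hb1 := hcells.bpIn.1
  have hb2 := hcells.bpIn.2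
  have hd1 := hcells.cpIn.1
  have hd2 := hcells.cpIn.2
  -- the empty list: both cells hold 0
  have hshape := hcells.shape
  simp only [ExtsAt] at hshape
  obtain ⟨hz8, hz4⟩ := hshape
  -- the load of `*blocks` (0x107db8), as a fact about the entry memory in the walker's form
  have l_blocks : e.mem.readLE (e.reg .rsi) 8 = 0 := by
    rw [rd_eq_readLE e.mem (e.reg .rsi) (e.reg .rsi).toNat 8 (by u_omega)]
    exact hz8
  -- THE WALK: 0x107da0 … 0x107dc1 `jmp 107e27` … 0x107e31 `ret` (the arm `jne 107dd9` is pruned: rbx = 0)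
  u_walk hcode [hμ.vendor] until [Gif.L.GifFreeExtensions.at_107dd9] span [ProgX.Base.L.textLo, ProgX.Base.L.textHi] side (v_side)
  case check_107db3 =>
    -- 0x107db3 (gifalloc.c:271): the load of `*blocks` lies inside the live holder
    have hun : ShadowUntouched e.mem s_107db3.mem := by v_untouched
    have hl : LiveIn (H.liveObjs ++ rest) frames ob on :=
      hlive.liveIn rest frames (Nat.le_refl _) (Nat.le_refl _)
    exact hl.accSmall hp.inv.shadow hun _ 8 (by decide) (by u_omega) (by u_omega)
  -- 0x107e31 (gifalloc.c:282): the `ret`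
  refine ReachVia.done (Or.inr ?_)
  v_returned
  -- THE POST: the heap is `H.releaseAll [] = H`; only 48 bytes of stack below the entry's stack pointer were written
  have hun : ShadowUntouched e.mem s_107e31.mem := by v_untouched
  have hs : Mem.SameExcept [⟨(e.reg .rsp).toNat - 48, (e.reg .rsp).toNat⟩] e.mem s_107e31.mem := by
    rw [w_mem]
    u_same
  have heq : Mem.EqOn H.base H.limit e.mem s_107e31.mem := by
    rw [hbase, hlimit, w_mem]
    u_eqon
  refine ⟨?_, ?_, ?_, ⟨[⟨(e.reg .rsp).toNat - 48, (e.reg .rsp).toNat⟩], hs, ?_⟩⟩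
  · -- the heap's invariant: no store went to the heap's region or to the shadow
    exact hp.inv.eqOn hun heq
  · -- `*blocks = NULL`, as at the entry
    rw [hs.rd _ 8 (by omega) (by simp only [List.mem_singleton, forall_eq]; omega)]
    exact hz8
  · -- `*count = 0`, as at the entry
    rw [hs.rd _ 4 (by omega) (by simp only [List.mem_singleton, forall_eq]; omega)]
    exact hz4
  · -- the footprint: one stack window, a gap of the heap
    intro w hw
    rw [List.mem_singleton.mp hw]
    exact Or.inr (Or.inr (fe1_stack_gap hp.inv.heap hbase _ he_room he_top))

/-- **A list** (`ex = some x`: the pointer cell holds `x.arr`, the base of a live object, not NULL): 0x107da0 … the checked load …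
`jne 107dd9`: the loop head before the first round (`Head … x 0`): the heap, the live objects and the two cells are the
entry's; four registers are saved. -/
theorem fe1_list (Lay : Layout) (hLay : Lay.hi = 0x1000000) (μ : Microarch) (hμ : UserX.MicroOK μ) (u₀ : State)
    (hcode : HasCodeNat Lay u₀ Gif.L.GifFreeExtensions.entry Gif.Code.code_GifFreeExtensions.nat Gif.L.GifFreeExtensions.size)
    (h_load8 : Asan.SmallCheck Lay μ ProgX.Base.WayInv (ProgX.Base.CodeOK u₀) [.rax, .rcx, .rdx] 8
      ProgX.Base.L.__asan_load8_noabort.entry)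
    (H : Heap) (rest : List Obj) (frames : List (Nat × FrameLayout)) (x : Exts) (ob on : Nat) (e : State) (ret : Word)
    (he : AtEntry (conv u₀) Gif.L.GifFreeExtensions.entry (GifFreeExtensions.spec H rest frames (some x) ob on).frame ret e)
    (hpre : (GifFreeExtensions.spec H rest frames (some x) ob on).pre e) :
    ReachVia Lay μ WayInv e (fun w =>
      (∃ y, GifFreeExtensions.Head H rest frames (some x) ob on y 0 u₀ e ret w) ∨
      Returned (conv u₀) (GifFreeExtensions.spec H rest frames (some x) ob on) e ret w) := by
  -- THE PRELUDE: the entry's facts, the precondition, where the holder of the two cells is (inside [800040H, C00000H))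
  have he0 := he
  v_entry he
  obtain ⟨hp, hcells⟩ := hpre
  have hbase := hp.base
  have hlimit := hp.limit
  have hlive : H.Live ob on := hcells.holder
  obtain ⟨cap, hcap⟩ := hcells.holder
  have hr1 := (hp.inv.heap.obj_range hcap).1
  have hi3 := (hp.inv.heap.obj_inside hcap).2.2.1
  rw [hbase] at hr1
  simp only at hr1 hi3
  have hb1 := hcells.bpIn.1
  have hb2 := hcells.bpIn.2
  have hd1 := hcells.cpIn.1
  have hd2 := hcells.cpIn.2
  -- the list: the pointer cell holds the array, the count cell the number of blocks
  have hshape0 := hcells.shape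
  have hshape := hshape0
  simp only [ExtsAt] at hshape
  obtain ⟨harr, hcnt, hlen, hblk⟩ := hshape
  -- the array is a live object of the heap: its base is not NULL
  have halive : H.Live x.arr (24 * x.cap) :=
    hcells.owns.live (x.arr, 24 * x.cap) (List.mem_cons_of_mem _ List.mem_cons_self)
  obtain ⟨acap, hacap⟩ := halive
  have har := (hp.inv.heap.obj_range hacap).1
  have hai := (hp.inv.heap.obj_inside hacap).2.2.1
  rw [hbase] at har
  simp only at har hai
  -- the load of `*blocks` (0x107db8), as a fact about the entry memory in the walker's form
  have l_blocks : e.mem.readLE (e.reg .rsi) 8 = x.arr := by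
    rw [rd_eq_readLE e.mem (e.reg .rsi) (e.reg .rsi).toNat 8 (by u_omega)]
    exact harr
  -- THE WALK: 0x107da0 … 0x107dbf `jne 107dd9` (the arm to the epilogue is pruned: rbx = x.arr ≠ 0)
  u_walk hcode [hμ.vendor] until [Gif.L.GifFreeExtensions.at_107dd9] span [ProgX.Base.L.textLo, ProgX.Base.L.textHi] side (v_side)
  case check_107db3 =>
    -- 0x107db3 (gifalloc.c:271): the load of `*blocks` lies inside the live holder
    have hun : ShadowUntouched e.mem s_107db3.mem := by v_untouched
    have hl : LiveIn (H.liveObjs ++ rest) frames ob on :=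
      hlive.liveIn rest frames (Nat.le_refl _) (Nat.le_refl _)
    exact hl.accSmall hp.inv.shadow hun _ 8 (by decide) (by u_omega) (by u_omega)
  -- 0x107dd9 (gifalloc.c:276): THE LOOP HEAD, before the first round; only 48 bytes of stack were written
  have hun : ShadowUntouched e.mem s_107dbf.mem := by v_untouched
  have hs : Mem.SameExcept [⟨(e.reg .rsp).toNat - 48, (e.reg .rsp).toNat⟩] e.mem s_107dbf.mem := by
    rw [w_mem]
    u_same
  have heq : Mem.EqOn H.base H.limit e.mem s_107dbf.mem := by
    rw [hbase, hlimit, w_mem]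
    u_eqon
  have ha64 : (UInt64.ofNat x.arr).toNat = x.arr := toNat_ofNat_addr x.arr (by omega)
  refine ReachVia.done (Or.inl ⟨x, ?_⟩)
  exact {
    entry := he0
    pre := ⟨hp, hcells⟩
    list := rfl
    le := Nat.zero_le _
    rip := w_rip
    rsp := w_rsp
    r12 := w_r12
    rbp := w_rbp
    -- `rbx = *blocks = x.arr`: the first block
    rbx := by
      rw [w_rbx, ha64, Nat.mul_zero, Nat.add_zero]
    r14 := w_kept.get .r14 rfl
    r15 := w_kept.get .r15 rfl
    -- the four pushes
    slot_r13 := by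
      rw [w_mem]
      u_read
    slot_r12 := by
      rw [w_mem]
      u_read
    slot_rbp := by
      rw [w_mem]
      u_read
    slot_rbx := by
      rw [w_mem]
      u_read
    -- the return address: every store went below its slot
    slot_ra := by
      u_frame he_retAddr
    -- the heap is the entry's (`heapAt_zero`), the stack pointer is 40 lower
    inv := (hp.inv.eqOn hun heq).lower (by omega) (by omega) (by omega)
    -- what is live is the holder and the whole list (`liveAt_zero`)
    owns := hcells.owns
    -- the two cells and the counted blocks lie in the heap's region: not written
    shape := by
      rw [hs.rd _ 8 (by omega) (by simp only [List.mem_singleton, forall_eq]; omega)]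
      rw [hs.rd _ 4 (by omega) (by simp only [List.mem_singleton, forall_eq]; omega)]
      refine hshape0.frame ?_ ?_
      · intro o ho
        simp only [Exts.structs, List.mem_singleton] at ho
        rw [ho]
        simp only
        rw [hbase, hlimit] at heq
        exact heq.mono (by omega) (by omega)
      · intro y hy
        cases hy
        omega
    -- the footprint so far: one stack window, a gap of the heap
    gaps := by
      refine ⟨[⟨(e.reg .rsp).toNat - 48, (e.reg .rsp).toNat⟩], hs, ?_⟩
      intro w hw
      rw [List.mem_singleton.mp hw]
      exact fe1_stack_gap hp.inv.heap hbase _ he_room he_top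
    same := by
      rw [w_mem]
      u_same
    code := ProgX.Base.conv_code_in w_eq
    abi := by
      refine ProgX.Base.abiInv_of ?_ ?_
      · rw [w_flags]
        simp only [X86.User.df_setStatus]
        exact w_df_107db3
      · rw [w_mxcsr]
        exact he_mx
  }

end Gif.Spec.GifFreeExtensions_1

/-- Segment 1 of `GifFreeExtensions`: from the entry to the `ret` (the empty list) or to the loop head with `k = 0` (a list). -/
theorem Gif.Spec.Proved.GifFreeExtensions_1_ok : Gif.Spec.GifFreeExtensions_1.Statement := by
  unfold Gif.Spec.GifFreeExtensions_1.Statement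
  intro Lay hLay μ hμ u₀ hcode h_load8 H rest frames ex ob on e ret he hpre
  cases ex with
  | none =>
    exact Gif.Spec.GifFreeExtensions_1.fe1_empty Lay hLay μ hμ u₀ hcode h_load8 H rest frames ob on e ret he hpre
  | some x =>
    exact Gif.Spec.GifFreeExtensions_1.fe1_list Lay hLay μ hμ u₀ hcode h_load8 H rest frames x ob on e ret he hpre
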